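-- pv_equiv track=rewrite | github.com/maxrampulla/practice | sudoku.py | quadFind
-- ===== SOURCE A (Python) =====
-- def quadFind (puzzle, quad):
--   quads = [[],[],[],[],[],[],[],[],[]]
--
--   rowCount = 0
--   for row in puzzle:
--     columnCount = 0
--     for i in row:
--       if isinstance(i, int) and i > 0:
--         if columnCount >= 0 and columnCount <= 2:
--           if rowCount >= 0 and rowCount <= 2:
--             quads[0].append(i)
--           elif rowCount >= 3 and rowCount <= 5:
--             quads[3].append(i)
--           elif rowCount >= 6 and rowCount <= 8:
--             quads[6].append(i)
--         elif columnCount >= 3 and columnCount <= 5: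
--           if rowCount >= 0 and rowCount <= 2:
--             quads[1].append(i)
--           elif rowCount >= 3 and rowCount <= 5:
--             quads[4].append(i)
--           elif rowCount >= 6 and rowCount <= 8:
--             quads[7].append(i)
--         elif columnCount >= 6 and columnCount <= 8:
--           if rowCount >= 0 and rowCount <= 2:
--             quads[2].append(i)
--           elif rowCount >= 3 and rowCount <= 5:
--             quads[5].append(i)
--           elif rowCount >= 6 and rowCount <= 8:
--             quads[8].append(i)
--       columnCount += 1
--     rowCount += 1
--   return (quads[quad])
-- ===== SOURCE B (Python) =====
-- def quadFind(puzzle, quad):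
--     # Look up the quadrant's top-left corner, then read only that block's rows.
--     offsets = [(rb, cb) for rb in (0, 3, 6) for cb in (0, 3, 6)]
--     rstart, cstart = offsets[quad]
--     found = []
--     for r in range(rstart, rstart + 3):
--         if r < len(puzzle):
--             found.extend(v for c, v in enumerate(puzzle[r])
--                          if cstart <= c < cstart + 3
--                          and isinstance(v, int) and v > 0)
--     return found
-- ===== Notes on version B (the rewrite author's own statement) =====
-- stated objective: simpler
-- what changed: Instead of classifying every cell of the whole grid into nine bucket lists and indexing the result, B looks the quadrant's top-left corner up in a 9-entry offset table and collects the positive values from just that quadrant's three rows.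
import Mathlib
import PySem

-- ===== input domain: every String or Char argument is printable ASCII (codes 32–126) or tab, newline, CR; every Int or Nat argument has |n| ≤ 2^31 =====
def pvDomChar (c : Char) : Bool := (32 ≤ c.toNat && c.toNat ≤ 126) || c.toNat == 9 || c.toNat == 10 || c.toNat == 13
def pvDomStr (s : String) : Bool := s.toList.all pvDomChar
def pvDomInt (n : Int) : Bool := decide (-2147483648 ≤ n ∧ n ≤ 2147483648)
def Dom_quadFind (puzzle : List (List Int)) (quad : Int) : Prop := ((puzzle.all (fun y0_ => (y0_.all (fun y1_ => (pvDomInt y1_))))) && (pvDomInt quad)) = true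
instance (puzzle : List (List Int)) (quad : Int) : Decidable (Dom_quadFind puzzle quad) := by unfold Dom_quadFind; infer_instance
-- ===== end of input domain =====

-- B replaces A's nine-bucket classification of the whole grid by an offset-table
-- lookup plus a scan of only the chosen quadrant's three rows (objective: simpler).

-- ===== PORT A =====
-- quads[j].append(i)
def pvApp (quads : List (List Int)) (j : Nat) (i : Int) : List (List Int) :=
  quads.modify j (fun q => q ++ [i])

-- the body of A's inner loop for one cell i at (rowCount, columnCount)
def quadFindCell (quads : List (List Int)) (rowCount columnCount : Int) (i : Int) : List (List Int) :=
  if i > 0 then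
    if columnCount ≥ 0 ∧ columnCount ≤ 2 then
      if rowCount ≥ 0 ∧ rowCount ≤ 2 then pvApp quads 0 i
      else if rowCount ≥ 3 ∧ rowCount ≤ 5 then pvApp quads 3 i
      else if rowCount ≥ 6 ∧ rowCount ≤ 8 then pvApp quads 6 i
      else quads
    else if columnCount ≥ 3 ∧ columnCount ≤ 5 then
      if rowCount ≥ 0 ∧ rowCount ≤ 2 then pvApp quads 1 i
      else if rowCount ≥ 3 ∧ rowCount ≤ 5 then pvApp quads 4 i
      else if rowCount ≥ 6 ∧ rowCount ≤ 8 then pvApp quads 7 i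
      else quads
    else if columnCount ≥ 6 ∧ columnCount ≤ 8 then
      if rowCount ≥ 0 ∧ rowCount ≤ 2 then pvApp quads 2 i
      else if rowCount ≥ 3 ∧ rowCount ≤ 5 then pvApp quads 5 i
      else if rowCount ≥ 6 ∧ rowCount ≤ 8 then pvApp quads 8 i
      else quads
    else quads
  else quads

-- A's inner loop over one row, carrying columnCount
def quadFindRow (quads : List (List Int)) (rowCount : Int) (row : List Int) : List (List Int) :=
  (row.foldl (fun (s : List (List Int) × Int) i => (quadFindCell s.1 rowCount s.2 i, s.2 + 1))
    (quads, (0 : Int))).1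

def quadFind (puzzle : List (List Int)) (quad : Int) : List Int :=
  let quads0 : List (List Int) := [[], [], [], [], [], [], [], [], []]
  let quads := (puzzle.foldl (fun (s : List (List Int) × Int) row => (quadFindRow s.1 s.2 row, s.2 + 1))
    (quads0, (0 : Int))).1
  (PySem.List.pyGet? quads quad).getD []   -- quads[quad]; Pre_ rules out the none (IndexError) case

-- ===== PORT B =====
def pvOffsets : List (Int × Int) := [(0,0),(0,3),(0,6),(3,0),(3,3),(3,6),(6,0),(6,3),(6,6)]

-- B's loop over the quadrant's three row indices, filtering each existing row
def pvAltBody (puzzle : List (List Int)) (rs cs : Int) : List Int :=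
  (PySem.List.pyRange rs (rs + 3) 1).foldl (fun found r =>
    if r < (puzzle.length : Int) then
      match PySem.List.pyGet? puzzle r with
      | none => found   -- unreachable: 0 ≤ r < len(puzzle)
      | some row =>
          found ++ (PySem.List.enumerate row 0).filterMap
            (fun cv => if cs ≤ cv.1 ∧ cv.1 < cs + 3 ∧ cv.2 > 0 then some cv.2 else none)
    else found) []

def quadFind_alt (puzzle : List (List Int)) (quad : Int) : List Int :=
  match PySem.List.pyGet? pvOffsets quad with
  | none => []   -- offsets[quad] raises IndexError; excluded by Pre_
  | some rc => pvAltBody puzzle rc.1 rc.2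

-- ===== PRECONDITION & SPEC =====
-- Pre_ excludes exactly quad ∉ [-9, 8], where A's quads[quad] raises IndexError.
def Pre_quadFind (puzzle : List (List Int)) (quad : Int) : Prop := -9 ≤ quad ∧ quad ≤ 8
instance (puzzle : List (List Int)) (quad : Int) : Decidable (Pre_quadFind puzzle quad) := by
  unfold Pre_quadFind; infer_instance

def pvWitness_quadFind : List (List Int) × Int := ([[1, 2, 0], [0, 5, 6], [7, 8, 9]], 0)

def Spec_quadFind (puzzle : List (List Int)) (quad : Int) (out : List Int) : Prop := out = quadFind_alt puzzle quad
instance (puzzle : List (List Int)) (quad : Int) (out : List Int) : Decidable (Spec_quadFind puzzle quad out) := by unfold Spec_quadFind; infer_instance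

-- ===== CLAIM (what is proved, stated in full; the proofs are below) =====
def Claim_equal_quadFind : Prop := ∀ (puzzle : List (List Int)) (quad : Int), Dom_quadFind puzzle quad → Pre_quadFind puzzle quad → Spec_quadFind puzzle quad (quadFind puzzle quad)

-- ===== LEMMAS AND PROOFS =====

-- which bucket (if any) A appends cell (n, m) to
def pvTarget (n m : Int) : Option Nat :=
  if m ≥ 0 ∧ m ≤ 2 then
    if n ≥ 0 ∧ n ≤ 2 then some 0 else if n ≥ 3 ∧ n ≤ 5 then some 3 else if n ≥ 6 ∧ n ≤ 8 then some 6 else none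
  else if m ≥ 3 ∧ m ≤ 5 then
    if n ≥ 0 ∧ n ≤ 2 then some 1 else if n ≥ 3 ∧ n ≤ 5 then some 4 else if n ≥ 6 ∧ n ≤ 8 then some 7 else none
  else if m ≥ 6 ∧ m ≤ 8 then
    if n ≥ 0 ∧ n ≤ 2 then some 2 else if n ≥ 3 ∧ n ≤ 5 then some 5 else if n ≥ 6 ∧ n ≤ 8 then some 8 else none
  else none

theorem pvTarget_eq_some (n m : Int) (k : Nat) :
    pvTarget n m = some k ↔ 0 ≤ n ∧ n ≤ 8 ∧ 0 ≤ m ∧ m ≤ 8 ∧ (k : Int) = (n / 3) * 3 + m / 3 := by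
  unfold pvTarget
  split_ifs <;> simp_all <;> omega

theorem quadFindCell_eq (quads : List (List Int)) (n m i : Int) :
    quadFindCell quads n m i =
      match (if i > 0 then pvTarget n m else none) with
      | some j => pvApp quads j i
      | none => quads := by
  unfold quadFindCell pvTarget
  split_ifs <;> rfl

theorem length_quadFindCell (quads : List (List Int)) (n m i : Int) :
    (quadFindCell quads n m i).length = quads.length := by
  rw [quadFindCell_eq]
  cases h : (if i > 0 then pvTarget n m else none) with
  | none => rfl
  | some j => simp [pvApp, List.length_modify]

theorem quadFindCell_getD (quads : List (List Int)) (n m i : Int) (k : Nat)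
    (hk : k < quads.length) :
    (quadFindCell quads n m i).getD k [] =
      quads.getD k [] ++ (if i > 0 ∧ pvTarget n m = some k then [i] else []) := by
  rw [quadFindCell_eq]
  by_cases hi : i > 0
  · simp only [hi, if_true]
    cases h : pvTarget n m with
    | none => simp
    | some j =>
      rw [List.getD_eq_getElem?_getD, List.getD_eq_getElem?_getD]
      unfold pvApp
      rw [List.getElem?_modify, List.getElem?_eq_getElem hk]
      by_cases hjk : j = k
      · simp [hjk]
      · simp [hjk]
  · simp [hi]

-- the cells A appends to bucket k while scanning one row from column m on
def pvRowSel (k : Nat) (n : Int) : Int → List Int → List Int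
  | _, [] => []
  | m, i :: t => (if i > 0 ∧ pvTarget n m = some k then [i] else []) ++ pvRowSel k n (m + 1) t

theorem quadFindRowAux_len (n : Int) (row : List Int) :
    ∀ (quads : List (List Int)) (m : Int),
      ((row.foldl (fun (s : List (List Int) × Int) i => (quadFindCell s.1 n s.2 i, s.2 + 1))
        (quads, m)).1).length = quads.length := by
  induction row with
  | nil => intro quads m; rfl
  | cons i t ih =>
      intro quads m
      simp only [List.foldl_cons]
      rw [ih]
      exact length_quadFindCell quads n m i

theorem quadFindRowAux_getD (n : Int) (k : Nat) (row : List Int) :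
    ∀ (quads : List (List Int)) (m : Int), k < quads.length →
      ((row.foldl (fun (s : List (List Int) × Int) i => (quadFindCell s.1 n s.2 i, s.2 + 1))
        (quads, m)).1).getD k [] = quads.getD k [] ++ pvRowSel k n m row := by
  induction row with
  | nil => intro quads m _; simp [pvRowSel]
  | cons i t ih =>
      intro quads m hk
      simp only [List.foldl_cons]
      rw [ih _ _ (by rw [length_quadFindCell]; exact hk), quadFindCell_getD quads n m i k hk,
          pvRowSel, List.append_assoc]

-- the cells A appends to bucket k while scanning rows from rowCount n on
def pvPuzSel (k : Nat) : Int → List (List Int) → List Int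
  | _, [] => []
  | n, row :: t => pvRowSel k n 0 row ++ pvPuzSel k (n + 1) t

theorem quadFindAux_len (puzzle : List (List Int)) :
    ∀ (quads : List (List Int)) (n : Int),
      ((puzzle.foldl (fun (s : List (List Int) × Int) row => (quadFindRow s.1 s.2 row, s.2 + 1))
        (quads, n)).1).length = quads.length := by
  induction puzzle with
  | nil => intro quads n; rfl
  | cons row t ih =>
      intro quads n
      simp only [List.foldl_cons]
      rw [ih]
      exact quadFindRowAux_len n row quads 0

theorem quadFindAux_getD (k : Nat) (puzzle : List (List Int)) :
    ∀ (quads : List (List Int)) (n : Int), k < quads.length →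
      ((puzzle.foldl (fun (s : List (List Int) × Int) row => (quadFindRow s.1 s.2 row, s.2 + 1))
        (quads, n)).1).getD k [] = quads.getD k [] ++ pvPuzSel k n puzzle := by
  induction puzzle with
  | nil => intro quads n _; simp [pvPuzSel]
  | cons row t ih =>
      intro quads n hk
      simp only [List.foldl_cons]
      rw [ih _ _ (by unfold quadFindRow; rw [quadFindRowAux_len]; exact hk)]
      show _ = _ ++ (pvRowSel k n 0 row ++ pvPuzSel k (n + 1) t)
      rw [show (quadFindRow quads n row).getD k [] = quads.getD k [] ++ pvRowSel k n 0 row from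
        quadFindRowAux_getD n k row quads 0 hk, List.append_assoc]

-- rows outside the quadrant's band contribute nothing to bucket k
theorem pvRowSel_nil (k : Nat) (n : Int) (hk : k < 9)
    (hn : ¬ (3 * ((k : Int) / 3) ≤ n ∧ n ≤ 3 * ((k : Int) / 3) + 2)) :
    ∀ (row : List Int) (m : Int), pvRowSel k n m row = [] := by
  intro row
  induction row with
  | nil => intro m; rfl
  | cons i t ih =>
      intro m
      rw [pvRowSel, ih]
      have : ¬ (i > 0 ∧ pvTarget n m = some k) := by
        rintro ⟨-, h⟩
        rw [pvTarget_eq_some] at h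
        omega
      simp [this]

-- inside the band, A's per-row selection is B's enumerate-filter of that row
theorem pvRowSel_eq_filterMap (k : Nat) (n : Int) (hk : k < 9)
    (hn : 3 * ((k : Int) / 3) ≤ n ∧ n ≤ 3 * ((k : Int) / 3) + 2) :
    ∀ (row : List Int) (m : Int),
      pvRowSel k n m row = (PySem.List.enumerate row m).filterMap
        (fun cv => if 3 * ((k : Int) % 3) ≤ cv.1 ∧ cv.1 < 3 * ((k : Int) % 3) + 3 ∧ cv.2 > 0
          then some cv.2 else none) := by
  intro row
  induction row with
  | nil => intro m; rfl
  | cons i t ih =>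
      intro m
      rw [pvRowSel, ih, PySem.List.enumerate_cons, List.filterMap_cons]
      have hcond : (i > 0 ∧ pvTarget n m = some k) ↔
          (3 * ((k : Int) % 3) ≤ m ∧ m < 3 * ((k : Int) % 3) + 3 ∧ i > 0) := by
        rw [pvTarget_eq_some]
        omega
      by_cases h : 3 * ((k : Int) % 3) ≤ m ∧ m < 3 * ((k : Int) % 3) + 3 ∧ i > 0
      · simp only [h, if_pos, hcond.mpr h, if_pos, and_self]
        simp [h]
      · have : ¬ (i > 0 ∧ pvTarget n m = some k) := fun hc => h (hcond.mp hc)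
        simp only [if_neg this, if_neg h]
        simp

-- contribution of absolute row r when the remaining rows start at rowCount n
def pvG (k : Nat) (t : List (List Int)) (n r : Int) : List Int :=
  if n ≤ r then
    match t[(r - n).toNat]? with
    | some row => pvRowSel k r 0 row
    | none => []
  else []

theorem pvG_nil (k : Nat) (n r : Int) : pvG k [] n r = [] := by
  unfold pvG
  split_ifs <;> rfl

theorem pvG_cons_self (k : Nat) (row : List (Int)) (t : List (List Int)) (n : Int) :
    pvG k (row :: t) n n = pvRowSel k n 0 row := by
  unfold pvG
  simp

theorem pvG_cons_ne (k : Nat) (row : List Int) (t : List (List Int)) (n r : Int) (h : n ≠ r) :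
    pvG k (row :: t) n r = pvG k t (n + 1) r := by
  unfold pvG
  by_cases hle : n + 1 ≤ r
  · rw [if_pos (by omega), if_pos hle]
    have : (r - n).toNat = (r - (n + 1)).toNat + 1 := by omega
    rw [this]
    rfl
  · rw [if_neg (by omega), if_neg hle]

-- the whole-grid bucket-k selection splits into the quadrant's three row contributions
theorem pvPuzSel_split (k : Nat) (hk : k < 9) (rs : Int) (hrs : rs = 3 * ((k : Int) / 3)) :
    ∀ (t : List (List Int)) (n : Int),
      pvPuzSel k n t = pvG k t n rs ++ pvG k t n (rs + 1) ++ pvG k t n (rs + 2) := by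
  intro t
  induction t with
  | nil => intro n; simp [pvPuzSel, pvG_nil]
  | cons row t ih =>
      intro n
      have hnil : ∀ r : Int, r < n + 1 → pvG k t (n + 1) r = [] := by
        intro r hr
        unfold pvG
        rw [if_neg (by omega)]
      rw [pvPuzSel, ih]
      by_cases h0 : n = rs
      · subst h0
        rw [pvG_cons_self, pvG_cons_ne k row t n (n + 1) (by omega),
            pvG_cons_ne k row t n (n + 2) (by omega), hnil n (by omega)]
        simp [List.append_assoc]
      · by_cases h1 : n = rs + 1
        · subst h1
          rw [pvG_cons_ne k row t (rs + 1) rs (by omega), pvG_cons_self,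
              pvG_cons_ne k row t (rs + 1) (rs + 2) (by omega),
              hnil rs (by omega), hnil (rs + 1) (by omega)]
          simp [List.append_assoc]
        · by_cases h2 : n = rs + 2
          · subst h2
            rw [pvG_cons_ne k row t (rs + 2) rs (by omega),
                pvG_cons_ne k row t (rs + 2) (rs + 1) (by omega), pvG_cons_self,
                hnil rs (by omega), hnil (rs + 1) (by omega), hnil (rs + 2) (by omega)]
            simp
          · rw [pvG_cons_ne k row t n rs h0, pvG_cons_ne k row t n (rs + 1) h1,
                pvG_cons_ne k row t n (rs + 2) h2,
                pvRowSel_nil k n hk (by omega) row 0]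
            simp

-- one step of B's fold equals appending the corresponding pvG contribution
theorem pvStep (k : Nat) (hk : k < 9) (puzzle : List (List Int)) (r : Int)
    (hr : 3 * ((k : Int) / 3) ≤ r ∧ r ≤ 3 * ((k : Int) / 3) + 2) (found : List Int) :
    (if r < (puzzle.length : Int) then
      match PySem.List.pyGet? puzzle r with
      | none => found
      | some row =>
          found ++ (PySem.List.enumerate row 0).filterMap
            (fun cv => if 3 * ((k : Int) % 3) ≤ cv.1 ∧ cv.1 < 3 * ((k : Int) % 3) + 3 ∧ cv.2 > 0
              then some cv.2 else none)
    else found) = found ++ pvG k puzzle 0 r := by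
  have h0 : (0 : Int) ≤ r := by omega
  by_cases hlt : r < (puzzle.length : Int)
  · have hidx : r.toNat < puzzle.length := by omega
    rw [if_pos hlt, PySem.List.pyGet?_of_nonneg puzzle h0, List.getElem?_eq_getElem hidx]
    unfold pvG
    rw [if_pos h0, sub_zero, List.getElem?_eq_getElem hidx]
    show found ++ (PySem.List.enumerate puzzle[r.toNat] 0).filterMap _ =
      found ++ pvRowSel k r 0 puzzle[r.toNat]
    rw [pvRowSel_eq_filterMap k r hk hr puzzle[r.toNat] 0]
  · rw [if_neg hlt]
    unfold pvG
    rw [if_pos h0, sub_zero, List.getElem?_eq_none (by omega)]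
    simp

-- A's bucket-k selection equals B's three-row scan
theorem pvCore (k : Nat) (hk : k < 9) (puzzle : List (List Int)) :
    pvPuzSel k 0 puzzle = pvAltBody puzzle (3 * ((k : Int) / 3)) (3 * ((k : Int) % 3)) := by
  unfold pvAltBody
  have hrange : PySem.List.pyRange (3 * ((k : Int) / 3)) (3 * ((k : Int) / 3) + 3) 1 =
      [3 * ((k : Int) / 3), 3 * ((k : Int) / 3) + 1, 3 * ((k : Int) / 3) + 2] := by
    rw [PySem.List.pyRange_one_cons (by omega), PySem.List.pyRange_one_cons (by omega),
        PySem.List.pyRange_one_cons (by omega), PySem.List.pyRange_one_eq_nil (by omega),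
        show 3 * ((k : Int) / 3) + 1 + 1 = 3 * ((k : Int) / 3) + 2 from by ring]
  rw [hrange]
  simp only [List.foldl_cons, List.foldl_nil]
  rw [pvStep k hk puzzle _ (by omega) _, pvStep k hk puzzle _ (by omega) _,
      pvStep k hk puzzle _ (by omega) _]
  rw [pvPuzSel_split k hk _ rfl puzzle 0]
  simp [List.append_assoc]

-- A's result is the bucket-k selection, for quad naming bucket k
theorem quadFind_eq (puzzle : List (List Int)) (quad : Int) (k : Nat) (hk : k < 9)
    (hq : quad = (k : Int) ∨ quad = (k : Int) - 9) :
    quadFind puzzle quad = pvPuzSel k 0 puzzle := by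
  unfold quadFind
  have hlen : ((puzzle.foldl (fun (s : List (List Int) × Int) row => (quadFindRow s.1 s.2 row, s.2 + 1))
      (([[], [], [], [], [], [], [], [], []] : List (List Int)), (0 : Int))).1).length = 9 :=
    quadFindAux_len puzzle _ 0
  set Q := (puzzle.foldl (fun (s : List (List Int) × Int) row => (quadFindRow s.1 s.2 row, s.2 + 1))
      (([[], [], [], [], [], [], [], [], []] : List (List Int)), (0 : Int))).1 with hQ
  have hget : PySem.List.pyGet? Q quad = Q[k]? := by
    rcases hq with h | h
    · rw [h, PySem.List.pyGet?_of_nonneg Q (by omega)]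
      norm_num
    · have hq' : quad = -(((9 - k : Nat) : Int)) := by push_cast; omega
      rw [hq', PySem.List.pyGet?_neg_natCast Q (9 - k) (by omega) (by omega), hlen]
      congr 1
      omega
  show (PySem.List.pyGet? Q quad).getD ([] : List Int) = pvPuzSel k 0 puzzle
  rw [hget, List.getElem?_eq_getElem (by omega), Option.getD_some,
      ← List.getD_eq_getElem _ ([] : List Int) (by omega), hQ, quadFindAux_getD k puzzle _ 0 (by norm_num; omega)]
  have h0 : ([[], [], [], [], [], [], [], [], []] : List (List Int)).getD k [] = [] := by
    interval_cases k <;> rfl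
  rw [h0, List.nil_append]

-- B's result is its body at the k-th offsets entry
theorem quadFind_alt_eq (puzzle : List (List Int)) (quad : Int) (k : Nat) (hk : k < 9)
    (hq : quad = (k : Int) ∨ quad = (k : Int) - 9) :
    quadFind_alt puzzle quad = pvAltBody puzzle (3 * ((k : Int) / 3)) (3 * ((k : Int) % 3)) := by
  unfold quadFind_alt
  have hoff : pvOffsets[k]? = some (3 * ((k : Int) / 3), 3 * ((k : Int) % 3)) := by
    interval_cases k <;> decide
  have hget : PySem.List.pyGet? pvOffsets quad = pvOffsets[k]? := by
    rcases hq with h | h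
    · rw [h, PySem.List.pyGet?_of_nonneg pvOffsets (by omega)]
      norm_num
    · have hq' : quad = -(((9 - k : Nat) : Int)) := by push_cast; omega
      rw [hq', PySem.List.pyGet?_neg_natCast pvOffsets (9 - k) (by omega) (by simp [pvOffsets])]
      simp only [pvOffsets]
      congr 1
      simp
      omega
  rw [hget, hoff]

-- ===== VERDICT (by name: the statement is the Claim_ definition above) =====
theorem quadFind_spec : Claim_equal_quadFind := by
  intro puzzle quad _ hpre
  unfold Spec_quadFind
  obtain ⟨h1, h2⟩ := hpre
  by_cases h : 0 ≤ quad
  · have hk : quad.toNat < 9 := by omega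
    rw [quadFind_eq puzzle quad quad.toNat hk (Or.inl (by omega)),
        quadFind_alt_eq puzzle quad quad.toNat hk (Or.inl (by omega)), pvCore quad.toNat hk]
  · have hk : (quad + 9).toNat < 9 := by omega
    rw [quadFind_eq puzzle quad (quad + 9).toNat hk (Or.inr (by omega)),
        quadFind_alt_eq puzzle quad (quad + 9).toNat hk (Or.inr (by omega)), pvCore (quad + 9).toNat hk]
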